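-- pv_equiv track=rewrite | github.com/BasedJellyfish11/Advent-of-Code-2021 | pest/days/day10.py | print_score
-- ===== SOURCE A (Python) =====
-- def print_score(illegal_chars):
--     total = 0
--     for x in illegal_chars:
--         if x == ")": total += 3
--         elif x == "]": total += 57
--         elif x == "}": total += 1197
--         else: total += 25137
--     return total
-- ===== SOURCE B (Python) =====
-- def print_score(illegal_chars):
--     c_paren = illegal_chars.count(")")
--     c_brack = illegal_chars.count("]")
--     c_brace = illegal_chars.count("}")
--     other = len(illegal_chars) - c_paren - c_brack - c_brace
--     return 3 * c_paren + 57 * c_brack + 1197 * c_brace + 25137 * other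
-- ===== Notes on version B (the rewrite author's own statement) =====
-- stated objective: alternative
-- what changed: Replaces the single accumulating loop with three count passes plus a length-minus-counts term for the catch-all branch, combined in one arithmetic expression.
import Mathlib
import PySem

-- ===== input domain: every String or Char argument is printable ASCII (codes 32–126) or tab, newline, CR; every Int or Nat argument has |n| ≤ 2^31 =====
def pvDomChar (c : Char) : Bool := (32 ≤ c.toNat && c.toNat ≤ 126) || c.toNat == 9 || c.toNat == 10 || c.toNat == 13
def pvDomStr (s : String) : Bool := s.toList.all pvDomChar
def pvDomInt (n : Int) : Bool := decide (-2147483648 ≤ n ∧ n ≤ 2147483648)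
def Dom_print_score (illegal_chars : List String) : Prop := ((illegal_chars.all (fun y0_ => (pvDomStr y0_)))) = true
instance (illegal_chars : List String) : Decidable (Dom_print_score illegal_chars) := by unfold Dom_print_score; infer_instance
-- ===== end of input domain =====

-- B replaces A's single accumulating loop by three count passes plus a length-minus-counts term (objective: alternative).

-- ===== PORT A =====
def print_score (illegal_chars : List String) : Int :=
  illegal_chars.foldl (fun total x =>
    if x = ")" then total + 3
    else if x = "]" then total + 57
    else if x = "}" then total + 1197
    else total + 25137) 0

-- ===== PORT B =====
def print_score_alt (illegal_chars : List String) : Int :=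
  let c_paren : Int := PySem.List.count illegal_chars ")"
  let c_brack : Int := PySem.List.count illegal_chars "]"
  let c_brace : Int := PySem.List.count illegal_chars "}"
  let other : Int := (illegal_chars.length : Int) - c_paren - c_brack - c_brace
  3 * c_paren + 57 * c_brack + 1197 * c_brace + 25137 * other

-- ===== PRECONDITION & SPEC =====
def Spec_print_score (illegal_chars : List String) (out : Int) : Prop := out = print_score_alt illegal_chars
instance (illegal_chars : List String) (out : Int) : Decidable (Spec_print_score illegal_chars out) := by unfold Spec_print_score; infer_instance

-- ===== CLAIM (what is proved, stated in full; the proofs are below) =====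
def Claim_equal_print_score : Prop := ∀ (illegal_chars : List String), Dom_print_score illegal_chars → Spec_print_score illegal_chars (print_score illegal_chars)

-- ===== LEMMAS AND PROOFS =====

lemma print_score_foldl_shift (xs : List String) (a : Int) :
    xs.foldl (fun total x =>
      if x = ")" then total + 3
      else if x = "]" then total + 57
      else if x = "}" then total + 1197
      else total + 25137) a
    = a + xs.foldl (fun total x =>
      if x = ")" then total + 3
      else if x = "]" then total + 57
      else if x = "}" then total + 1197
      else total + 25137) 0 := by
  induction xs generalizing a with
  | nil => simp
  | cons y ys ih =>
    simp only [List.foldl_cons]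
    rw [ih, ih (if y = ")" then 0 + 3 else if y = "]" then 0 + 57 else if y = "}" then 0 + 1197 else 0 + 25137)]
    split_ifs <;> ring

theorem print_score_spec_aux (xs : List String) :
    print_score xs = print_score_alt xs := by
  induction xs with
  | nil => simp [print_score, print_score_alt, PySem.List.count]
  | cons y ys ih =>
    simp only [print_score, List.foldl_cons] at *
    rw [print_score_foldl_shift]
    rw [ih]
    simp only [print_score_alt, PySem.List.count, List.count_cons, List.length_cons, beq_iff_eq]
    split_ifs with h1 h2 h3 <;> simp_all <;> push_cast <;> ring

-- ===== VERDICT (by name: the statement is the Claim_ definition above) =====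
theorem print_score_spec : Claim_equal_print_score := by
  intro xs _
  exact print_score_spec_aux xs
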